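-- pv_equiv track=rewrite | github.com/slomkowski/nginx-config-formatter | nginxfmt.py | _multi_semicolon
-- ===== SOURCE A (Python) =====
-- def _multi_semicolon(single_line):
--     """Break multi semicolon into multiline (except when within quotation marks)."""
--     single_line = single_line.strip()
--     if single_line.startswith('#'):
--         return single_line
--
--     within_quotes = False
--     quote_char = None
--     result = []
--     for char in single_line:
--         if char in ['"', "'"]:
--             if within_quotes:
--                 if char == quote_char:
--                     within_quotes = False
--                     quote_char = None
--             else:
--                 within_quotes = True
--                 quote_char = char
--             result.append(char)
--         elif not within_quotes and char == ';':
--             result.append(";\n")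
--         else:
--             result.append(char)
--     return ''.join(result)
-- ===== SOURCE B (Python) =====
-- def _multi_semicolon(single_line):
--     """Break multi semicolon into multiline (except when within quotation marks)."""
--     single_line = single_line.strip()
--     if single_line.startswith('#'):
--         return single_line
--
--     out = []
--     rest = single_line
--     while rest:
--         q = next((i for i, ch in enumerate(rest) if ch in '"\''), len(rest))
--         out.append(rest[:q].replace(';', ';\n'))
--         if q == len(rest):
--             break
--         close = rest.find(rest[q], q + 1)
--         if close == -1:
--             out.append(rest[q:])
--             break
--         out.append(rest[q:close + 1])
--         rest = rest[close + 1:]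
--     return ''.join(out)
-- ===== Notes on version B (the rewrite author's own statement) =====
-- stated objective: alternative
-- what changed: Replaces A's per-character quote-state machine (within_quotes/quote_char flags updated on every character) by a chunk-wise scan that jumps to the next quote, applies a single str.replace to break the semicolons of each unquoted gap, and copies each quoted run verbatim via str.find of its closing quote.
import Mathlib
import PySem

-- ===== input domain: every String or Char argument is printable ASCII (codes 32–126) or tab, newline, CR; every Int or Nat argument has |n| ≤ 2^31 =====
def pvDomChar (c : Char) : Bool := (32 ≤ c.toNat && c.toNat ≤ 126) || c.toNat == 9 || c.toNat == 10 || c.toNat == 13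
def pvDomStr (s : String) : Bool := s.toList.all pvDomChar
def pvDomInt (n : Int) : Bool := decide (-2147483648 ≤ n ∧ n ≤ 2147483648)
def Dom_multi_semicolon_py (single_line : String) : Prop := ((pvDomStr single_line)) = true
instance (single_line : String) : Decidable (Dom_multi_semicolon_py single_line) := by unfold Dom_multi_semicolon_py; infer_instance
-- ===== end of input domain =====

-- B replaces A's per-character quote state machine by a chunk-wise scan (jump to the
-- next quote, replace ';' in the unquoted gap, copy the quoted run verbatim); objective: alternative.

-- ===== PORT A =====
-- the body of A's for-loop (state: within_quotes, quote_char, result)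
def pvStepA (st : Bool × Option Char × List String) (char : Char) : Bool × Option Char × List String :=
  if char = '"' ∨ char = '\'' then
    if st.1 then
      if (some char : Option Char) = st.2.1 then
        (false, none, st.2.2 ++ [String.singleton char])
      else
        (st.1, st.2.1, st.2.2 ++ [String.singleton char])
    else
      (true, some char, st.2.2 ++ [String.singleton char])
  else if st.1 = false ∧ char = ';' then
    (st.1, st.2.1, st.2.2 ++ [";\n"])
  else
    (st.1, st.2.1, st.2.2 ++ [String.singleton char])

def multi_semicolon_py (single_line : String) : String :=
  let s := PySem.Str.strip single_line
  if PySem.Str.startswith s "#" then s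
  else
    let fin := s.toList.foldl pvStepA (false, none, [])
    PySem.Str.join "" fin.2.2

-- ===== PORT B =====
-- chunk loop of Source B (the while-loop as the obvious structural recursion on `rest`);
-- rest[:q] / rest[q:…] are ported with PySem.List.slice, rest.find(rest[q], q+1) with PySem.Chars.findFrom
theorem pvSliceFromLenLt {α : Type} (xs : List α) (i : Int) (h1 : 1 ≤ i) (h2 : xs ≠ []) :
    (PySem.List.slice xs (some i) none).length < xs.length := by
  rw [PySem.List.slice_from _ (by omega : (0:Int) ≤ i)]
  simp only [List.length_drop]
  have := List.length_pos_of_ne_nil h2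
  omega

def pvBurst (rest : List Char) : List Char :=
  if _hr : rest.isEmpty then []
  else
    -- q = next((i for i, ch in enumerate(rest) if ch in '"\''), len(rest))
    let q : Nat := ((rest.findIdx? (fun ch => decide (ch = '"' ∨ ch = '\''))).getD rest.length)
    let head := PySem.Chars.replace (PySem.List.slice rest none (some (q : Int))) [';'] [';', '\n']
    if q = rest.length then head
    else
      let qc := rest.getD q ' '  -- rest[q]; q < len(rest) here, so this is Python's rest[q]
      let close := PySem.Chars.findFrom rest [qc] ((q : Int) + 1)
      if close = -1 then
        head ++ PySem.List.slice rest (some (q : Int)) none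
      else
        head ++ PySem.List.slice rest (some (q : Int)) (some (close + 1)) ++
          pvBurst (PySem.List.slice rest (some (close + 1)) none)
termination_by rest.length
decreasing_by
  · rename_i h1 h2
    have hq : q < rest.length := by
      rcases h : List.findIdx? (fun ch => decide (ch = '"' ∨ ch = '\'')) rest with _ | i
      · apply absurd _ h1
        simp only [q, h, Option.getD_none]
      · have hi := (List.findIdx?_eq_some_iff_findIdx_eq.mp h).1
        have hqi : q = i := by simp only [q, h, Option.getD_some]
        omega
    have hk : q + 1 ≤ rest.length := hq
    have h2' : PySem.Chars.findFrom rest [qc] ((q + 1 : Nat) : Int) ≠ -1 := by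
      push_cast
      exact h2
    have hspec := (PySem.Chars.findFrom_natCast_spec rest [qc] (q + 1) hk h2').1
    have hge : (1:Int) ≤ close + 1 := by
      have h3 : ((q + 1 : Nat) : Int) ≤ PySem.Chars.findFrom rest [qc] ((q + 1 : Nat) : Int) := hspec
      push_cast at h3
      simp only [close]
      omega
    exact pvSliceFromLenLt rest _ hge (by simpa using _hr)

def multi_semicolon_py_alt (single_line : String) : String :=
  let s := PySem.Str.strip single_line
  if PySem.Str.startswith s "#" then s
  else String.ofList (pvBurst s.toList)

-- ===== PRECONDITION & SPEC =====
def Spec_multi_semicolon_py (single_line : String) (out : String) : Prop := out = multi_semicolon_py_alt single_line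
instance (single_line : String) (out : String) : Decidable (Spec_multi_semicolon_py single_line out) := by unfold Spec_multi_semicolon_py; infer_instance

-- ===== CLAIM (what is proved, stated in full; the proofs are below) =====
def Claim_equal_multi_semicolon_py : Prop := ∀ (single_line : String), Dom_multi_semicolon_py single_line → Spec_multi_semicolon_py single_line (multi_semicolon_py single_line)

-- ===== LEMMAS AND PROOFS =====

-- reference semantics: A's state machine written as mutual recursion over the characters
mutual
def pvRunOut : List Char → List Char
  | [] => []
  | c :: cs =>
    if c = '"' ∨ c = '\'' then c :: pvRunIn c cs
    else if c = ';' then ';' :: '\n' :: pvRunOut cs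
    else c :: pvRunOut cs
def pvRunIn : Char → List Char → List Char
  | _, [] => []
  | q, c :: cs => c :: (if c = q then pvRunOut cs else pvRunIn q cs)
end

def pvFlat (l : List String) : List Char := (l.map String.toList).flatten

def pvSemiRepl (l : List Char) : List Char := l.flatMap (fun c => if c = ';' then [';', '\n'] else [c])

theorem pvFlat_append_singleton (acc : List String) (s : String) :
    pvFlat (acc ++ [s]) = pvFlat acc ++ s.toList := by
  simp [pvFlat]

-- A-side characterisation: the foldl from either machine state produces pvRunOut / pvRunIn
theorem pvFoldA (cs : List Char) :
    (∀ acc, pvFlat ((cs.foldl pvStepA (false, none, acc)).2.2) = pvFlat acc ++ pvRunOut cs)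
    ∧ (∀ q acc, (q = '"' ∨ q = '\'') →
        pvFlat ((cs.foldl pvStepA (true, some q, acc)).2.2) = pvFlat acc ++ pvRunIn q cs) := by
  induction cs with
  | nil => exact ⟨fun acc => by simp [pvRunOut], fun q acc _ => by simp [pvRunIn]⟩
  | cons c cs ih =>
    obtain ⟨ih1, ih2⟩ := ih
    refine ⟨fun acc => ?_, fun q acc hq => ?_⟩
    · by_cases hc : c = '"' ∨ c = '\''
      · rw [List.foldl_cons,
          show pvStepA (false, none, acc) c = (true, some c, acc ++ [String.singleton c]) by
            simp [pvStepA, hc],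
          ih2 c _ hc, pvFlat_append_singleton, pvRunOut, if_pos hc]
        simp
      · by_cases hs : c = ';'
        · rw [List.foldl_cons,
            show pvStepA (false, none, acc) c = (false, none, acc ++ [";\n"]) by
              simp [pvStepA, hs],
            ih1, pvFlat_append_singleton, pvRunOut, if_neg hc, if_pos hs]
          simp
        · rw [List.foldl_cons,
            show pvStepA (false, none, acc) c = (false, none, acc ++ [String.singleton c]) by
              simp [pvStepA, hs]
              exact not_or.mp hc,
            ih1, pvFlat_append_singleton, pvRunOut, if_neg hc, if_neg hs]
          simp
    · by_cases hc : c = '"' ∨ c = '\''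
      · by_cases hcq : c = q
        · rw [List.foldl_cons,
            show pvStepA (true, some q, acc) c = (false, none, acc ++ [String.singleton c]) by
              simp [pvStepA, hcq]; tauto,
            ih1, pvFlat_append_singleton, pvRunIn, if_pos hcq]
          simp
        · rw [List.foldl_cons,
            show pvStepA (true, some q, acc) c = (true, some q, acc ++ [String.singleton c]) by
              simp [pvStepA, hc, hcq],
            ih2 q _ hq, pvFlat_append_singleton, pvRunIn, if_neg hcq]
          simp
      · have hcq : ¬ c = q := by rintro rfl; exact hc hq
        rw [List.foldl_cons,
          show pvStepA (true, some q, acc) c = (true, some q, acc ++ [String.singleton c]) by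
            simp [pvStepA, hc],
          ih2 q _ hq, pvFlat_append_singleton, pvRunIn, if_neg hcq]
        simp

-- quote-free prefixes just get their semicolons burst
theorem pvRunOut_append_of_no_quote (t r : List Char)
    (h : ∀ c ∈ t, ¬ (c = '"' ∨ c = '\'')) :
    pvRunOut (t ++ r) = pvSemiRepl t ++ pvRunOut r := by
  induction t with
  | nil => simp [pvSemiRepl]
  | cons c t ih =>
    have hc := h c (by simp)
    by_cases hs : c = ';' <;>
      simp [pvRunOut, if_neg hc, hs, pvSemiRepl, ih (fun x hx => h x (by simp [hx])),
        List.flatMap_cons]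

theorem pvRunOut_of_no_quote (t : List Char) (h : ∀ c ∈ t, ¬ (c = '"' ∨ c = '\'')) :
    pvRunOut t = pvSemiRepl t := by
  have := pvRunOut_append_of_no_quote t [] h
  simpa [pvRunOut] using this

-- inside quotes: copy verbatim until the matching quote (or to the end)
theorem pvRunIn_of_not_mem (q : Char) (t : List Char) (h : q ∉ t) : pvRunIn q t = t := by
  induction t with
  | nil => rfl
  | cons c t ih =>
    have hcq : ¬ c = q := fun hh => h (by simp [hh.symm])
    simp [pvRunIn, if_neg hcq, ih (fun hm => h (by simp [hm]))]

theorem pvRunIn_append_close (q : Char) (t1 t2 : List Char) (h : q ∉ t1) :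
    pvRunIn q (t1 ++ q :: t2) = t1 ++ q :: pvRunOut t2 := by
  induction t1 with
  | nil => simp [pvRunIn]
  | cons c t1 ih =>
    have hcq : ¬ c = q := fun hh => h (by simp [hh.symm])
    simp [pvRunIn, if_neg hcq, ih (fun hm => h (by simp [hm]))]

-- str.replace on a one-character needle is a flatMap
theorem pvReplaceGo (c : Char) (r : List Char) (l : List Char) :
    ∀ (fuel : Nat) (acc : List Char), l.length ≤ fuel →
      PySem.Chars.replace.go [c] r fuel l acc
        = acc.reverse ++ l.flatMap (fun x => if x = c then r else [x]) := by
  induction l with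
  | nil =>
    intro fuel acc _
    cases fuel <;> simp [PySem.Chars.replace.go]
  | cons x t ih =>
    intro fuel acc hf
    cases fuel with
    | zero => simp at hf
    | succ f =>
      by_cases hx : x = c
      · rw [PySem.Chars.replace.go,
          if_pos (by simp [hx, List.isPrefixOf] : [c].isPrefixOf (x :: t) = true)]
        simp only [List.length_cons] at hf
        rw [show List.drop [c].length (x :: t) = t by simp]
        rw [ih f _ (by omega)]
        simp [hx, List.flatMap_cons]
      · rw [PySem.Chars.replace.go,
          if_neg (by simp [List.isPrefixOf, Ne.symm hx])]
        simp only [List.length_cons] at hf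
        rw [ih f _ (by omega)]
        simp [hx, List.flatMap_cons]

theorem pvReplaceSemi (l : List Char) :
    PySem.Chars.replace l [';'] [';', '\n'] = pvSemiRepl l := by
  rw [PySem.Chars.replace, if_neg (by simp)]
  rw [pvReplaceGo ';' [';', '\n'] l l.length [] le_rfl]
  simp [pvSemiRepl]

-- str.find for a one-character needle is findIdx?
theorem pvFindGo (c : Char) (l : List Char) :
    ∀ k : Nat, PySem.Chars.find.go [c] l k
      = (match l.findIdx? (fun x => x == c) with
         | none => (-1 : Int)
         | some i => ((k + i : Nat) : Int)) := by
  induction l with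
  | nil => intro k; simp [PySem.Chars.find.go]
  | cons x t ih =>
    intro k
    by_cases hx : x = c
    · rw [PySem.Chars.find.go,
        if_pos (by simp [hx, List.isPrefixOf] : [c].isPrefixOf (x :: t) = true)]
      simp [List.findIdx?_cons, hx]
    · rw [PySem.Chars.find.go,
        if_neg (by simp [List.isPrefixOf, Ne.symm hx])]
      rw [ih (k + 1)]
      rcases h : t.findIdx? (fun x => x == c) with _ | i <;>
        simp only [List.findIdx?_cons, beq_iff_eq, hx, h, Option.map_none,
          Option.map_some]
      · rfl
      · push_cast; ring_nf

theorem pvFindSingle (c : Char) (l : List Char) :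
    PySem.Chars.find l [c]
      = (match l.findIdx? (fun x => x == c) with
         | none => (-1 : Int)
         | some i => (i : Int)) := by
  rw [PySem.Chars.find, pvFindGo c l 0]
  rcases h : l.findIdx? (fun x => x == c) with _ | i <;> simp

-- B-side characterisation: the chunk loop computes pvRunOut
theorem pvBurst_eq_aux : ∀ (n : Nat) (cs : List Char), cs.length ≤ n → pvBurst cs = pvRunOut cs := by
  intro n
  induction n with
  | zero =>
    intro cs h
    have hnil : cs = [] := List.eq_nil_of_length_eq_zero (Nat.le_zero.mp h)
    subst hnil
    simp [pvBurst, pvRunOut]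
  | succ n ih =>
    intro cs hlen
    rcases hcs : cs with _ | ⟨c0, cs0⟩
    · simp [pvBurst, pvRunOut]
    rw [← hcs]
    have hne : cs ≠ [] := by simp [hcs]
    rw [pvBurst, dif_neg (by simp [hcs])]
    rcases hfi : cs.findIdx? (fun ch => decide (ch = '"' ∨ ch = '\'')) with _ | i
    · -- no quote anywhere: head is the whole line with semicolons burst
      simp only [Option.getD_none]
      rw [PySem.List.slice_to _ (by positivity), pvReplaceSemi]
      have hnoq : ∀ c ∈ cs, ¬ (c = '"' ∨ c = '\'') := by
        intro c hc
        have := List.findIdx?_eq_none_iff.mp hfi c hc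
        simpa using this
      rw [pvRunOut_of_no_quote _ hnoq]
      simp
    · obtain ⟨hi, hidx⟩ := List.findIdx?_eq_some_iff_findIdx_eq.mp hfi
      have hqi : (decide (cs[i] = '"' ∨ cs[i] = '\'')) = true := by
        have := @List.findIdx_getElem _ (fun ch => decide (ch = '"' ∨ ch = '\'')) cs
          (by rw [hidx]; omega)
        simp only [hidx] at this
        simpa using this
      have hquote : cs[i] = '"' ∨ cs[i] = '\'' := by simpa using hqi
      have hpre : ∀ c ∈ cs.take i, ¬ (c = '"' ∨ c = '\'') := by
        intro c hc
        obtain ⟨j, hj, hcj⟩ := List.mem_take_iff_getElem.mp hc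
        have hj2 : j < List.findIdx (fun ch => decide (ch = '"' ∨ ch = '\'')) cs := by
          rw [hidx]; omega
        have := List.not_of_lt_findIdx hj2
        rw [← hcj]
        simpa using this
      simp only [Option.getD_some, if_neg (by omega : ¬ i = cs.length)]
      rw [List.getD_eq_getElem cs ' ' hi]
      have hcast : ((i : Int) + 1) = ((i + 1 : Nat) : Int) := by push_cast; ring
      rw [hcast, PySem.Chars.findFrom_natCast cs [cs[i]] (i+1) (by omega),
        pvFindSingle cs[i] (cs.drop (i+1))]
      have hdecomp : cs = cs.take i ++ cs[i] :: cs.drop (i+1) := by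
        conv_lhs => rw [← List.take_append_drop i cs]
        rw [List.drop_eq_getElem_cons hi]
      rcases hf2 : (cs.drop (i+1)).findIdx? (fun x => x == cs[i]) with _ | j
      · -- unterminated quote: the tail is copied verbatim
        simp only []
        rw [PySem.List.slice_to _ (by positivity), pvReplaceSemi,
          PySem.List.slice_from _ (by positivity)]
        simp only [Int.toNat_natCast]
        have hnm : cs[i] ∉ cs.drop (i+1) := by
          intro hm
          have := List.findIdx?_eq_none_iff.mp hf2 _ hm
          simp at this
        conv_rhs => rw [hdecomp]
        rw [pvRunOut_append_of_no_quote _ _ hpre, pvRunOut, if_pos hquote,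
          pvRunIn_of_not_mem _ _ hnm]
        rw [List.drop_eq_getElem_cons hi]
        simp
      · -- quoted run copied verbatim, loop continues after its closing quote
        obtain ⟨hj, hjdx⟩ := List.findIdx?_eq_some_iff_findIdx_eq.mp hf2
        have hclose : ((j : Int)) ≠ -1 := by omega
        simp only [if_neg hclose,
          if_neg (by omega : ¬ ((i + 1 : Nat) : Int) + (j : Int) = -1)]
        have hc2 : ((i + 1 : Nat) : Int) + (j : Int) + 1 = ((i + j + 2 : Nat) : Int) := by
          push_cast; ring
        have hc3 : ((i : Int)) = ((i : Nat) : Int) := rfl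
        rw [hc2, hc3, PySem.List.slice_natCast, PySem.List.slice_to _ (by positivity),
          PySem.List.slice_from _ (by positivity), pvReplaceSemi]
        have hT2 : List.drop (j+1) (cs.drop (i+1)) = cs.drop (i+j+2) := by
          rw [List.drop_drop]; congr 1; omega
        have hjq : (cs.drop (i+1))[j] = cs[i] := by
          have := @List.findIdx_getElem _ (fun x => x == cs[i]) (cs.drop (i+1))
            (by rw [hjdx]; omega)
          simp only [hjdx] at this
          simpa using this
        have hnmT1 : cs[i] ∉ (cs.drop (i+1)).take j := by
          intro hm
          obtain ⟨k, hk, hck⟩ := List.mem_take_iff_getElem.mp hm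
          have := List.not_of_lt_findIdx (p := fun x => x == cs[i]) (xs := cs.drop (i+1))
            (i := k) (by rw [hjdx]; omega)
          simp only [beq_eq_false_iff_ne, ne_eq] at this
          exact this hck
        have hdec2 : cs.drop (i+1) = (cs.drop (i+1)).take j ++ cs[i] :: cs.drop (i+j+2) := by
          conv_lhs => rw [← List.take_append_drop j (cs.drop (i+1))]
          rw [List.drop_eq_getElem_cons (by omega : j < (cs.drop (i+1)).length), hjq, hT2]
        -- IH on the rest of the line
        rw [ih (List.drop (((i + j + 2 : Nat) : Int)).toNat cs) (by
          simp only [List.length_drop, Int.toNat_natCast]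
          omega)]
        -- left: the copied chunk cs[i:close+1]
        have htake : List.take (i + j + 2 - i) (cs.drop i)
            = cs[i] :: ((cs.drop (i+1)).take j ++ [cs[i]]) := by
          rw [List.drop_eq_getElem_cons hi,
            show i + j + 2 - i = (j + 1) + 1 by omega, List.take_cons (by omega)]
          congr 1
          rw [show j + 1 + 1 - 1 = j + 1 by omega, List.take_add_one,
            List.getElem?_eq_getElem (by omega : j < (cs.drop (i+1)).length), hjq]
          rfl
        rw [show ((i + j + 2 : Nat) : Int).toNat = i + j + 2 by omega,
          show ((i : Nat) : Int).toNat = i by omega, htake]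
        -- right: unfold the state machine over the decomposition
        conv_rhs => rw [hdecomp]
        rw [pvRunOut_append_of_no_quote _ _ hpre, pvRunOut, if_pos hquote]
        conv_rhs => rw [hdec2]
        rw [pvRunIn_append_close _ _ _ hnmT1]
        simp
  

theorem pvBurst_eq (cs : List Char) : pvBurst cs = pvRunOut cs :=
  pvBurst_eq_aux cs.length cs le_rfl

theorem pvJoinNil (ps : List (List Char)) : PySem.Chars.join [] ps = ps.flatten := by
  induction ps with
  | nil => simp [PySem.Chars.join_nil]
  | cons p ps ih =>
    cases ps with
    | nil => simp [PySem.Chars.join_singleton]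
    | cons q rest => rw [PySem.Chars.join_cons_cons]; simp_all

-- ===== VERDICT (by name: the statement is the Claim_ definition above) =====
theorem multi_semicolon_py_spec : Claim_equal_multi_semicolon_py := by
  intro single_line _
  unfold Spec_multi_semicolon_py multi_semicolon_py multi_semicolon_py_alt
  by_cases h : PySem.Str.startswith (PySem.Str.strip single_line) "#" = true
  · rw [if_pos h, if_pos h]
  · rw [if_neg h, if_neg h]
    apply String.toList_inj.mp
    rw [String.toList_ofList, pvBurst_eq, PySem.Str.toList_join,
      show ("" : String).toList = [] from rfl, pvJoinNil]
    have := (pvFoldA (PySem.Str.strip single_line).toList).1 []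
    simpa [pvFlat] using this
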